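-- pv_equiv track=rewrite | github.com/shuyalintud/ExpenseBuddy | expense_buddy.py | generate_settlements
-- ===== SOURCE A (Python) =====
-- def generate_settlements(balances):
--     """
--     Generate settlement instructions based on calculated balances.
--
--     Parameters:
--         balances (dict): Dictionary with roommate names as keys and their balance as values.
--
--     Returns:
--         list: List of tuples in the format (debtor, creditor, amount) representing each settlement.
--     """
--     settlements = []
--     creditors = {k: v for k, v in balances.items() if v > 0}
--     debtors = {k: -v for k, v in balances.items() if v < 0}
--
--     creditors = sorted(creditors.items(), key=lambda x: -x[1])
--     debtors = sorted(debtors.items(), key=lambda x: -x[1])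
--
--     while debtors and creditors:
--         debtor, debt = debtors.pop(0)
--         creditor, credit = creditors.pop(0)
--         amount = min(debt, credit)
--
--         settlements.append((debtor, creditor, amount))
--
--         if credit > amount:
--             creditors.insert(0, (creditor, credit - amount))
--         if debt > amount:
--             debtors.insert(0, (debtor, debt - amount))
--
--     return settlements
-- ===== SOURCE B (Python) =====
-- def generate_settlements(balances):
--     creditors = sorted(((k, v) for k, v in balances.items() if v > 0), key=lambda x: -x[1])
--     debtors = sorted(((k, -v) for k, v in balances.items() if v < 0), key=lambda x: -x[1])
--     if not debtors or not creditors: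
--         return []
--     settlements = []
--     i = j = 0
--     dname, drem = debtors[0]
--     cname, crem = creditors[0]
--     while True:
--         amount = min(drem, crem)
--         settlements.append((dname, cname, amount))
--         drem -= amount
--         crem -= amount
--         if drem == 0:
--             i += 1
--             if i == len(debtors):
--                 break
--             dname, drem = debtors[i]
--         if crem == 0:
--             j += 1
--             if j == len(creditors):
--                 break
--             cname, crem = creditors[j]
--     return settlements
-- ===== Notes on version B (the rewrite author's own statement) =====
-- stated objective: alternative
-- what changed: A repeatedly pops both sorted work lists at index 0 and re-inserts the unpaid remainder at the front; B never rewrites the lists: one forward pass with two cursors carrying the current debtor/creditor remainders as scalars.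
import Mathlib
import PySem

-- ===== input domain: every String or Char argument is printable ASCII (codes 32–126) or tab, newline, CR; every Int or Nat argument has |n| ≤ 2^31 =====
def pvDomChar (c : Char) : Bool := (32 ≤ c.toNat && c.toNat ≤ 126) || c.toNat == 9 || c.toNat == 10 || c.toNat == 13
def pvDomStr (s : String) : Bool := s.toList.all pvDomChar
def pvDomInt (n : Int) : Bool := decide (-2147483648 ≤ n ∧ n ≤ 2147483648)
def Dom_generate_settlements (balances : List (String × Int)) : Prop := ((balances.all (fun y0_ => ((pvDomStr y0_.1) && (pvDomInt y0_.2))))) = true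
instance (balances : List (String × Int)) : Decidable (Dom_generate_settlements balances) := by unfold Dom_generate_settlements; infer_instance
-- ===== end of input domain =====

-- B replaces A's pop(0)/insert(0) rewriting of the work lists by a single forward pass carrying the
-- current debtor/creditor remainders as scalars (objective: alternative traversal, lists never rewritten).

-- ===== PORT A =====
-- the while loop of A: pop the head of each list, settle min, re-insert the unpaid remainder at the front
def settleLoopA : List (String × Int) → List (String × Int) → List (String × String × Int)
  | [], _ => []
  | _ :: _, [] => []
  | (debtor, debt) :: ds, (creditor, credit) :: cs =>
    let amount := min debt credit
    (debtor, creditor, amount) ::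
      settleLoopA (if amount < debt then (debtor, debt - amount) :: ds else ds)
                  (if amount < credit then (creditor, credit - amount) :: cs else cs)
termination_by ds cs => ds.length + cs.length
decreasing_by
  rcases min_cases debt credit with ⟨h, _⟩ | ⟨h, _⟩ <;> split_ifs <;> simp <;> omega

def generate_settlements (balances : List (String × Int)) : List (String × String × Int) :=
  let items := (PySem.Dict.ofList balances).items
  let creditors := PySem.List.sorted (items.filter (fun p => decide (0 < p.2))) (fun x => -x.2) false
  let debtors := PySem.List.sorted (((items.filter (fun p => decide (p.2 < 0))).map (fun p => (p.1, -p.2)))) (fun x => -x.2) false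
  settleLoopA debtors creditors

-- ===== PORT B =====
-- B's while-True loop over index/remainder state, transcribed as recursion on the two list suffixes
def settleLoopB (dn : String) (dr : Int) (ds : List (String × Int))
    (cn : String) (cr : Int) (cs : List (String × Int)) : List (String × String × Int) :=
  let amount := min dr cr
  let head := (dn, cn, amount)
  let dr' := dr - amount
  let cr' := cr - amount
  if dr' = 0 then
    match ds with
    | [] => [head]
    | (dn2, dr2) :: ds2 =>
      if cr' = 0 then
        match cs with
        | [] => [head]
        | (cn2, cr2) :: cs2 => head :: settleLoopB dn2 dr2 ds2 cn2 cr2 cs2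
      else head :: settleLoopB dn2 dr2 ds2 cn cr' cs
  else
    if cr' = 0 then
      match cs with
      | [] => [head]
      | (cn2, cr2) :: cs2 => head :: settleLoopB dn dr' ds cn2 cr2 cs2
    else [head]  -- unreachable: amount = min dr cr forces dr' = 0 ∨ cr' = 0
termination_by ds.length + cs.length
decreasing_by all_goals simp <;> omega

def generate_settlements_alt (balances : List (String × Int)) : List (String × String × Int) :=
  let items := (PySem.Dict.ofList balances).items
  let creditors := PySem.List.sorted (items.filter (fun p => decide (0 < p.2))) (fun x => -x.2) false
  let debtors := PySem.List.sorted (((items.filter (fun p => decide (p.2 < 0))).map (fun p => (p.1, -p.2)))) (fun x => -x.2) false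
  match debtors, creditors with
  | (dn, dr) :: ds, (cn, cr) :: cs => settleLoopB dn dr ds cn cr cs
  | _, _ => []

-- ===== PRECONDITION & SPEC =====
def Spec_generate_settlements (balances : List (String × Int)) (out : List (String × String × Int)) : Prop := out = generate_settlements_alt balances
instance (balances : List (String × Int)) (out : List (String × String × Int)) : Decidable (Spec_generate_settlements balances out) := by unfold Spec_generate_settlements; infer_instance

-- ===== CLAIM (what is proved, stated in full; the proofs are below) =====
def Claim_equal_generate_settlements : Prop := ∀ (balances : List (String × Int)), Dom_generate_settlements balances → Spec_generate_settlements balances (generate_settlements balances)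

-- ===== LEMMAS AND PROOFS =====

lemma settleLoopA_nil_left (cs : List (String × Int)) : settleLoopA [] cs = [] := by
  rw [settleLoopA]

lemma settleLoopA_nil_right (d : String × Int) (ds : List (String × Int)) :
    settleLoopA (d :: ds) [] = [] := by
  rw [settleLoopA]

-- A's loop and B's loop agree once both work lists are nonempty: A's head pair (with its
-- re-inserted remainders) is exactly B's scalar debtor/creditor state.
lemma loopA_eq_loopB : ∀ (dn : String) (dr : Int) (ds : List (String × Int))
    (cn : String) (cr : Int) (cs : List (String × Int)),
    settleLoopA ((dn, dr) :: ds) ((cn, cr) :: cs) = settleLoopB dn dr ds cn cr cs := by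
  intro dn dr ds cn cr cs
  fun_induction settleLoopB dn dr ds cn cr cs <;> rw [settleLoopA] <;> split_ifs <;>
    first
      | (exfalso; omega)
      | simp only [settleLoopA_nil_left, settleLoopA_nil_right, List.cons.injEq, and_true, *] <;>
          first | rfl | exact ⟨rfl, by assumption⟩

lemma loopA_eq_match (ds cs : List (String × Int)) :
    settleLoopA ds cs = (match ds, cs with
      | (dn, dr) :: ds', (cn, cr) :: cs' => settleLoopB dn dr ds' cn cr cs'
      | _, _ => []) := by
  match ds, cs with
  | [], _ => simp [settleLoopA_nil_left]
  | _ :: _, [] => simp [settleLoopA_nil_right]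
  | (dn, dr) :: ds', (cn, cr) :: cs' => exact loopA_eq_loopB dn dr ds' cn cr cs'

theorem generate_settlements_spec : Claim_equal_generate_settlements := by
  intro balances _
  unfold Spec_generate_settlements generate_settlements generate_settlements_alt
  exact loopA_eq_match _ _
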